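-- pv_equiv track=rewrite | github.com/AbinayaSwaminathan/CodeSignal | quora/mutatearray/mutatearray.py | solution
-- ===== SOURCE A (Python) =====
-- def solution(n, a):
--     b = [None] * n
--     if n==1:
--         return a
--     for i in range(n):
--         if i == 0:
--             b[0]=a[0]+a[1]
--         elif i >= n-1:
--             b[i] = a[i-1] + a[i] + 0
--         else:
--             b[i] = a[i-1] + a[i] + a[i+1]
--     return b
-- ===== SOURCE B (Python) =====
-- def solution(n, a):
--     if n == 1:
--         return a
--     prefix = [0]
--     for x in a[:n]:
--         prefix.append(prefix[-1] + x)
--     return [prefix[min(i + 2, n)] - prefix[max(i - 1, 0)] for i in range(n)]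
-- ===== Notes on version B (the rewrite author's own statement) =====
-- stated objective: alternative
-- what changed: Replaces A's four-way branched direct neighbor additions by a staged prefix-sum pass followed by clamped window differences prefix[min(i+2,n)] - prefix[max(i-1,0)].
import Mathlib
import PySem

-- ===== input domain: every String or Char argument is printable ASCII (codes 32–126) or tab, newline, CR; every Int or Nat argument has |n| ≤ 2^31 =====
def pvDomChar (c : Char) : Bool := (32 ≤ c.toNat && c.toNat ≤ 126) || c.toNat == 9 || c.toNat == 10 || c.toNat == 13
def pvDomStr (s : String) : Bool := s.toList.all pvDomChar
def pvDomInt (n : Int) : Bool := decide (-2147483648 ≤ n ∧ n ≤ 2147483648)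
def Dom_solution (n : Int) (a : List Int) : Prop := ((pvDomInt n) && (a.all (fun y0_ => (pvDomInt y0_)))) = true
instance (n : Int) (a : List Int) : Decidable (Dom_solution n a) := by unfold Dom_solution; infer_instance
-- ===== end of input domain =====

-- B replaces A's four-way branched direct neighbor additions by a staged
-- prefix-sum pass followed by clamped window differences (alternative; same cost).

-- ===== PORT A =====
-- A preallocates b = [None]*n and assigns b[i] for i = 0,1,…,n-1 in order;
-- since the slots are written strictly left to right, the loop is ported as a
-- foldl that appends each computed element.  a[j] (always nonnegative j here,
-- raising IndexError out of range) is ported as pyGetD, exact under Pre_solution.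
def solution (n : Int) (a : List Int) : List Int :=
  if n = 1 then a
  else
    (PySem.List.pyRange 0 n 1).foldl (fun b i =>
      if i = 0 then
        b ++ [PySem.List.pyGetD a 0 0 + PySem.List.pyGetD a 1 0]
      else if n - 1 ≤ i then
        b ++ [PySem.List.pyGetD a (i - 1) 0 + PySem.List.pyGetD a i 0 + 0]
      else
        b ++ [PySem.List.pyGetD a (i - 1) 0 + PySem.List.pyGetD a i 0 + PySem.List.pyGetD a (i + 1) 0]) []

-- ===== PORT B =====
-- prefix = [0]; for x in a[:n]: prefix.append(prefix[-1] + x);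
-- then [prefix[min(i+2,n)] - prefix[max(i-1,0)] for i in range(n)].
-- prefix[-1] is ported as pyGetD prefix (-1) 0 (exact: prefix is never empty).
def solution_alt (n : Int) (a : List Int) : List Int :=
  if n = 1 then a
  else
    let pfx := (PySem.List.slice a none (some n)).foldl
      (fun p x => p ++ [PySem.List.pyGetD p (-1) 0 + x]) [0]
    (PySem.List.pyRange 0 n 1).map (fun i =>
      PySem.List.pyGetD pfx (min (i + 2) n) 0 - PySem.List.pyGetD pfx (max (i - 1) 0) 0)

-- ===== PRECONDITION & SPEC =====
-- For 2 ≤ n the Python A indexes a[0], a[1], …, a[n-1] and raises IndexError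
-- when a has fewer than n elements; Pre_ excludes exactly those inputs
-- (for n ≤ 1 A always returns).
def Pre_solution (n : Int) (a : List Int) : Prop := n ≤ 1 ∨ n ≤ (a.length : Int)
instance (n : Int) (a : List Int) : Decidable (Pre_solution n a) := by unfold Pre_solution; infer_instance
def pvWitness_solution : Int × List Int := (4, [1, 2, 3, 4])
def Spec_solution (n : Int) (a : List Int) (out : List Int) : Prop := out = solution_alt n a
instance (n : Int) (a : List Int) (out : List Int) : Decidable (Spec_solution n a out) := by unfold Spec_solution; infer_instance

-- ===== CLAIM (what is proved, stated in full; the proofs are below) =====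
def Claim_equal_solution : Prop := ∀ (n : Int) (a : List Int), Dom_solution n a → Pre_solution n a → Spec_solution n a (solution n a)

-- ===== LEMMAS AND PROOFS =====

-- pure model of B's prefix loop: partial sums of t starting from s (s excluded)
def psums (s : Int) : List Int → List Int
  | [] => []
  | x :: t => (s + x) :: psums (s + x) t

lemma psums_fold (t : List Int) : ∀ (acc : List Int) (s : Int), acc ≠ [] → acc.getLast? = some s →
    t.foldl (fun p x => p ++ [PySem.List.pyGetD p (-1) 0 + x]) acc = acc ++ psums s t := by
  induction t with
  | nil => intro acc s _ _; simp [psums]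
  | cons x t ih =>
    intro acc s hne hlast
    have hget : PySem.List.pyGetD acc (-1) 0 = s := by
      rw [PySem.List.pyGetD_neg_one acc 0 hne]
      rw [List.getLast?_eq_some_getLast hne] at hlast
      exact Option.some.inj hlast
    simp only [List.foldl_cons, hget]
    rw [ih (acc ++ [s + x]) (s + x) (by simp) (by simp), psums]
    simp

lemma psums_getD : ∀ (t : List Int) (s : Int) (k : Nat), k ≤ t.length →
    (s :: psums s t).getD k 0 = s + (t.take k).sum := by
  intro t
  induction t with
  | nil =>
    intro s k hk
    simp only [List.length_nil, Nat.le_zero] at hk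
    subst hk; simp
  | cons x t ih =>
    intro s k hk
    cases k with
    | zero => simp
    | succ k =>
      have := ih (s + x) k (by simpa using hk)
      simp only [psums, List.getD_cons_succ, List.take_succ_cons, List.sum_cons]
      rw [this]; ring

-- peeling one element off a take-prefix sum
lemma take_succ_sum (t : List Int) (j : Nat) (hj : j < t.length) :
    (t.take (j + 1)).sum = (t.take j).sum + t.getD j 0 := by
  rw [List.sum_take_succ t j hj]
  simp [List.getD, List.getElem?_eq_getElem hj]

-- a and its truncation agree on indices below the truncation point
lemma take_getD (a : List Int) (m j : Nat) (hj : j < m) :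
    (a.take m).getD j 0 = a.getD j 0 := by
  simp [List.getD, hj]

-- pointwise agreement of A's branch value with B's prefix-difference window
lemma window_eq (n : Int) (a : List Int) (hn : 2 ≤ n) (hlen : n ≤ (a.length : Int))
    (i : Int) (hi0 : 0 ≤ i) (hin : i < n) :
    (if i = 0 then
        PySem.List.pyGetD a 0 0 + PySem.List.pyGetD a 1 0
      else if n - 1 ≤ i then
        PySem.List.pyGetD a (i - 1) 0 + PySem.List.pyGetD a i 0 + 0
      else
        PySem.List.pyGetD a (i - 1) 0 + PySem.List.pyGetD a i 0 + PySem.List.pyGetD a (i + 1) 0)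
    = PySem.List.pyGetD ((0 : Int) :: psums 0 (PySem.List.slice a none (some n))) (min (i + 2) n) 0
      - PySem.List.pyGetD ((0 : Int) :: psums 0 (PySem.List.slice a none (some n))) (max (i - 1) 0) 0 := by
  rw [PySem.List.slice_to a (by omega : (0:Int) ≤ n)]
  set m := n.toNat with hm
  have hmlen : m ≤ a.length := by omega
  have hm2 : 2 ≤ m := by omega
  set t := a.take m with ht
  have htlen : t.length = m := by simp [ht, Nat.min_eq_left hmlen]
  set k := i.toNat with hk
  have hkm : k < m := by omega
  -- index casts
  have hhi : min (i + 2) n = ((min (k + 2) m : Nat) : Int) := by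
    simp only [Nat.cast_min]; omega
  have hlo : max (i - 1) 0 = ((k - 1 : Nat) : Int) := by omega
  rw [hhi, hlo, PySem.List.pyGetD_natCast, PySem.List.pyGetD_natCast]
  rw [psums_getD t 0 (min (k + 2) m) (by omega), psums_getD t 0 (k - 1) (by omega)]
  -- a-side reads, cast to getD on t
  have ra : ∀ (j : Nat), j < m → PySem.List.pyGetD a (j : Int) 0 = t.getD j 0 := by
    intro j hj
    rw [PySem.List.pyGetD_natCast, take_getD a m j hj]
  by_cases hz : i = 0
  · have hk0 : k = 0 := by omega
    have e0 := ra 0 (by omega)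
    have e1 := ra 1 (by omega)
    rw [if_pos hz, hz] at *
    rw [show PySem.List.pyGetD a 0 0 = t.getD 0 0 by exact_mod_cast e0,
        show PySem.List.pyGetD a 1 0 = t.getD 1 0 by exact_mod_cast e1]
    rw [hk0]
    norm_num
    rw [show min 2 m = 1 + 1 by omega, take_succ_sum t 1 (by omega),
        show (1 : Nat) = 0 + 1 by rfl, take_succ_sum t 0 (by omega)]
    simp
  · have hk1 : 1 ≤ k := by omega
    have elo : (t.take (k - 1)).sum = (t.take (k - 1)).sum := rfl
    have eim1 : PySem.List.pyGetD a (i - 1) 0 = t.getD (k - 1) 0 := by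
      rw [show i - 1 = ((k - 1 : Nat) : Int) by omega]; exact ra (k - 1) (by omega)
    have ei : PySem.List.pyGetD a i 0 = t.getD k 0 := by
      rw [show i = ((k : Nat) : Int) by omega]; exact ra k hkm
    by_cases hlast : n - 1 ≤ i
    · have hke : k = m - 1 := by omega
      rw [if_neg hz, if_pos hlast, eim1, ei]
      rw [show min (k + 2) m = (k - 1) + 1 + 1 by omega,
          take_succ_sum t ((k - 1) + 1) (by omega), take_succ_sum t (k - 1) (by omega),
          show k - 1 + 1 = k by omega]
      ring
    · have eip1 : PySem.List.pyGetD a (i + 1) 0 = t.getD (k + 1) 0 := by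
        rw [show i + 1 = ((k + 1 : Nat) : Int) by omega]; exact ra (k + 1) (by omega)
      rw [if_neg hz, if_neg hlast, eim1, ei, eip1]
      rw [show min (k + 2) m = (k - 1) + 1 + 1 + 1 by omega,
          take_succ_sum t ((k - 1) + 1 + 1) (by omega), take_succ_sum t ((k - 1) + 1) (by omega),
          take_succ_sum t (k - 1) (by omega),
          show k - 1 + 1 = k by omega]
      ring

-- ===== VERDICT (by name: the statement is the Claim_ definition above) =====
theorem solution_spec : Claim_equal_solution := by
  intro n a _ hpre
  unfold Spec_solution solution solution_alt
  by_cases h1 : n = 1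
  · simp [h1]
  · simp only [if_neg h1]
    rw [psums_fold (PySem.List.slice a none (some n)) [0] 0 (by simp) (by simp),
        List.singleton_append]
    by_cases hn0 : n ≤ 0
    · rw [PySem.List.pyRange_one_eq_nil (by omega : n ≤ 0)]
      simp
    · have hn2 : 2 ≤ n := by omega
      have hlen : n ≤ (a.length : Int) := by
        rcases hpre with h | h
        · omega
        · exact h
      have hfun : (fun (b : List Int) (i : Int) =>
          if i = 0 then b ++ [PySem.List.pyGetD a 0 0 + PySem.List.pyGetD a 1 0]
          else if n - 1 ≤ i then b ++ [PySem.List.pyGetD a (i - 1) 0 + PySem.List.pyGetD a i 0 + 0]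
          else b ++ [PySem.List.pyGetD a (i - 1) 0 + PySem.List.pyGetD a i 0 + PySem.List.pyGetD a (i + 1) 0])
        = (fun (b : List Int) (i : Int) => b ++
            [if i = 0 then PySem.List.pyGetD a 0 0 + PySem.List.pyGetD a 1 0
             else if n - 1 ≤ i then PySem.List.pyGetD a (i - 1) 0 + PySem.List.pyGetD a i 0 + 0
             else PySem.List.pyGetD a (i - 1) 0 + PySem.List.pyGetD a i 0 + PySem.List.pyGetD a (i + 1) 0]) := by
        funext b i; split_ifs <;> rfl
      rw [hfun, PySem.List.foldl_append_singleton_eq_map, List.nil_append]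
      apply List.map_congr_left
      intro i hi
      rw [PySem.List.mem_pyRange_one] at hi
      exact window_eq n a hn2 hlen i hi.1 hi.2
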